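-- pv_equiv track=rewrite | github.com/psncl/freeCodeCamp-daily-challenges | 2026/02 (February)/2026-02-22/Solution.py | count_medals
-- ===== SOURCE A (Python) =====
-- class MedalTally:
--     country_name: str
--     gold_count: int = 0
--     silver_count: int = 0
--     bronze_count: int = 0
--
--     def __init__(self, country: str) -> None:
--         self.country_name = country
--
--     @property
--     def total_medal_count(self) -> int:
--         return self.gold_count + self.silver_count + self.bronze_count
--
--     def to_csv_row(self) -> str:
--         return ",".join([
--             self.country_name,
--             str(self.gold_count),
--             str(self.silver_count),
--             str(self.bronze_count),
--             str(self.total_medal_count)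
--             ])
--
-- def count_medals(winners: list[list[str]]) -> str:
--
--     countries_medals: dict[str, MedalTally] = {}
--
--     for event in winners:
--         for i in range(len(event)):
--             country_name = event[i]
--
--             countries_medals.setdefault(country_name, MedalTally(country_name))
--
--             country_medals = countries_medals[country_name]
--
--             if i == 0:
--                 country_medals.gold_count += 1
--             elif i == 1:
--                 country_medals.silver_count += 1
--             elif i == 2:
--                 country_medals.bronze_count += 1
--
--     # Negated gold_count in order to sort first by DESC, then by ASC.
--     sorted_countries = sorted(countries_medals.values(), key=lambda c: (-c.gold_count, c.country_name))
--
--     csv_header = "Country,Gold,Silver,Bronze,Total"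
--     csv_rows = "\n".join([c.to_csv_row() for c in sorted_countries])
--
--     return "\n".join([csv_header, csv_rows])
-- ===== SOURCE B (Python) =====
-- def count_medals(winners: list[list[str]]) -> str:
--     # Sort-then-group: flatten to (country, podium position) pairs, sort them,
--     # scan runs of equal country to form rows, then sort rows by (-gold, name).
--     pairs = sorted((name, pos) for e in winners for pos, name in enumerate(e))
--     rows = []
--     k = 0
--     while k < len(pairs):
--         name = pairs[k][0]
--         g = s = b = 0
--         while k < len(pairs) and pairs[k][0] == name:
--             pos = pairs[k][1]
--             if pos == 0:
--                 g += 1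
--             elif pos == 1:
--                 s += 1
--             elif pos == 2:
--                 b += 1
--             k += 1
--         rows.append((name, g, s, b))
--     rows.sort(key=lambda r: (-r[1], r[0]))
--     body = "\n".join(",".join((n, str(g), str(s), str(b), str(g + s + b)))
--                      for n, g, s, b in rows)
--     return "\n".join(["Country,Gold,Silver,Bronze,Total", body])
-- ===== Notes on version B (the rewrite author's own statement) =====
-- stated objective: alternative
-- what changed: Replaces A's dict of MedalTally objects (one tallying pass with an if/elif position dispatch per entry) by a sort-then-group algorithm: flatten to (country, position) pairs, sort them, scan runs of equal country to build the rows, then sort the rows by (-gold, name).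
import Mathlib
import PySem

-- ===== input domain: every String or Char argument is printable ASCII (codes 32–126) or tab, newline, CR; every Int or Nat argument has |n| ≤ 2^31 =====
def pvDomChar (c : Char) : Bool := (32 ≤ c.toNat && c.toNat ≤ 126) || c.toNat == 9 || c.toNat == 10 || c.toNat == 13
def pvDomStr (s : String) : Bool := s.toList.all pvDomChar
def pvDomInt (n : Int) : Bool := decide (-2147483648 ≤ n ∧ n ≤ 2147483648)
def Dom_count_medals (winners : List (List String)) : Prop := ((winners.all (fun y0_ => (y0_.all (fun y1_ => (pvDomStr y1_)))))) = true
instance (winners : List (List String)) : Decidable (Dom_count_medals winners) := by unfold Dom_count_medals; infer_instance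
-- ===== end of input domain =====

-- B replaces A's dict-of-MedalTally tallying pass by sort-then-group: sort the flattened
-- (country, position) pairs, scan runs of equal country, then sort rows by (-gold, name).

-- ===== PORT A =====
-- MedalTally object ported as the tuple (country_name, gold, silver, bronze); the lookup
-- countries_medals[country_name] directly after the setdefault can never raise KeyError,
-- so it is ported as getD (exact here).
def count_medals (winners : List (List String)) : String :=
  let countries_medals : PySem.Dict String (String × Int × Int × Int) :=
    winners.foldl (fun d event =>
      (PySem.List.pyRange 0 (PySem.List.len event)).foldl (fun d i =>
        let country_name := PySem.List.pyGetD event i ""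
        let d := d.setdefault country_name (country_name, 0, 0, 0)
        let m := d.getD country_name (country_name, 0, 0, 0)
        if i == 0 then d.insert country_name (m.1, m.2.1 + 1, m.2.2.1, m.2.2.2)
        else if i == 1 then d.insert country_name (m.1, m.2.1, m.2.2.1 + 1, m.2.2.2)
        else if i == 2 then d.insert country_name (m.1, m.2.1, m.2.2.1, m.2.2.2 + 1)
        else d) d) PySem.Dict.empty
  let sorted_countries := PySem.List.sorted2 countries_medals.values
      (fun c => -c.2.1) (fun c => c.1)
  let csv_header := "Country,Gold,Silver,Bronze,Total"
  let csv_rows := PySem.Str.join "\n" (sorted_countries.map (fun c =>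
      PySem.Str.join "," [c.1, PySem.Int.toStr c.2.1, PySem.Int.toStr c.2.2.1,
        PySem.Int.toStr c.2.2.2, PySem.Int.toStr (c.2.1 + c.2.2.1 + c.2.2.2)]))
  PySem.Str.join "\n" [csv_header, csv_rows]

-- ===== PORT B =====
-- the inner 'while' of Source B consumes the maximal run of pairs with the current name
-- (= takeWhile) and the index k then points at the rest (= dropWhile); g/s/b are the
-- run's fold with the same if/elif dispatch
def pvRunCounts (run : List (String × Int)) : Int × Int × Int :=
  run.foldl (fun gsb q =>
    if q.2 == 0 then (gsb.1 + 1, gsb.2.1, gsb.2.2)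
    else if q.2 == 1 then (gsb.1, gsb.2.1 + 1, gsb.2.2)
    else if q.2 == 2 then (gsb.1, gsb.2.1, gsb.2.2 + 1)
    else gsb) (0, 0, 0)

def pvRowsOf : List (String × Int) → List (String × Int × Int × Int)
  | [] => []
  | p :: rest =>
    let run := (p :: rest).takeWhile (fun q => q.1 == p.1)
    let tail := (p :: rest).dropWhile (fun q => q.1 == p.1)
    (p.1, pvRunCounts run) :: pvRowsOf tail
termination_by ps => ps.length
decreasing_by
  simp only [List.dropWhile_cons, beq_self_eq_true, if_pos]
  exact Nat.lt_succ_of_le (List.length_dropWhile_le _ _)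

def count_medals_alt (winners : List (List String)) : String :=
  let pairs := PySem.List.sorted2
    (winners.flatMap (fun e => (PySem.List.enumerate e).map (fun q => (q.2, q.1))))
    (fun p => p.1) (fun p => p.2)
  let rows := PySem.List.sorted2 (pvRowsOf pairs) (fun r => -r.2.1) (fun r => r.1)
  let body := PySem.Str.join "\n" (rows.map (fun r =>
    PySem.Str.join "," [r.1, PySem.Int.toStr r.2.1, PySem.Int.toStr r.2.2.1,
      PySem.Int.toStr r.2.2.2, PySem.Int.toStr (r.2.1 + r.2.2.1 + r.2.2.2)]))
  PySem.Str.join "\n" ["Country,Gold,Silver,Bronze,Total", body]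

-- ===== PRECONDITION & SPEC =====
def Spec_count_medals (winners : List (List String)) (out : String) : Prop := out = count_medals_alt winners
instance (winners : List (List String)) (out : String) : Decidable (Spec_count_medals winners out) := by unfold Spec_count_medals; infer_instance

-- ===== CLAIM (what is proved, stated in full; the proofs are below) =====
def Claim_equal_count_medals : Prop := ∀ (winners : List (List String)), Dom_count_medals winners → Spec_count_medals winners (count_medals winners)

-- ===== LEMMAS AND PROOFS =====

-- proof-side definitions
def pvStep (d : PySem.Dict String (String × Int × Int × Int)) (p : Int × String) :
    PySem.Dict String (String × Int × Int × Int) :=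
  let d1 := d.setdefault p.2 (p.2, 0, 0, 0)
  let m := d1.getD p.2 (p.2, 0, 0, 0)
  if p.1 == 0 then d1.insert p.2 (m.1, m.2.1 + 1, m.2.2.1, m.2.2.2)
  else if p.1 == 1 then d1.insert p.2 (m.1, m.2.1, m.2.2.1 + 1, m.2.2.2)
  else if p.1 == 2 then d1.insert p.2 (m.1, m.2.1, m.2.2.1, m.2.2.2 + 1)
  else d1

def pvCnt (L : List (Int × String)) (i : Int) (n : String) : Nat :=
  (L.filter (fun p => p.1 == i && p.2 == n)).length

def pvCol (winners : List (List String)) (k : Nat) : List String :=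
  winners.filterMap (fun e => e[k]?)

def pvF (winners : List (List String)) (n : String) : String × Int × Int × Int :=
  (n, ((pvCol winners 0).count n : Int), ((pvCol winners 1).count n : Int),
      ((pvCol winners 2).count n : Int))

lemma pv_inner_eq (event : List String) (d : PySem.Dict String (String × Int × Int × Int)) :
    (PySem.List.pyRange 0 (PySem.List.len event)).foldl (fun d i =>
        let country_name := PySem.List.pyGetD event i ""
        let d := d.setdefault country_name (country_name, 0, 0, 0)
        let m := d.getD country_name (country_name, 0, 0, 0)
        if i == 0 then d.insert country_name (m.1, m.2.1 + 1, m.2.2.1, m.2.2.2)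
        else if i == 1 then d.insert country_name (m.1, m.2.1, m.2.2.1 + 1, m.2.2.2)
        else if i == 2 then d.insert country_name (m.1, m.2.1, m.2.2.1, m.2.2.2 + 1)
        else d) d
      = (PySem.List.enumerate event).foldl pvStep d := by
  rw [PySem.List.enumerate_eq_map_pyRange event "", List.foldl_map]
  rfl

lemma pv_step_get? (d : PySem.Dict String (String × Int × Int × Int)) (i : Int) (name n : String) :
    (pvStep d (i, name)).get? n =
      if n = name then
        some (((d.get? name).getD (name, 0, 0, 0)).1,
              ((d.get? name).getD (name, 0, 0, 0)).2.1 + (if i = 0 then 1 else 0),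
              ((d.get? name).getD (name, 0, 0, 0)).2.2.1 + (if i = 1 then 1 else 0),
              ((d.get? name).getD (name, 0, 0, 0)).2.2.2 + (if i = 2 then 1 else 0))
      else d.get? n := by
  unfold pvStep
  by_cases hn : n = name
  · subst hn
    by_cases h0 : i = 0
    · simp [h0, PySem.Dict.get?_insert_self, PySem.Dict.getD_eq_get?_getD,
        PySem.Dict.get?_setdefault_self]
    · by_cases h1 : i = 1
      · simp [h0, h1, PySem.Dict.get?_insert_self, PySem.Dict.getD_eq_get?_getD,
          PySem.Dict.get?_setdefault_self]
      · by_cases h2 : i = 2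
        · simp [h0, h1, h2, PySem.Dict.get?_insert_self, PySem.Dict.getD_eq_get?_getD,
            PySem.Dict.get?_setdefault_self]
        · simp [h0, h1, h2, PySem.Dict.get?_setdefault_self, PySem.Dict.getD_eq_get?_getD]
  · have hget : ∀ v, ((d.setdefault name (name,0,0,0)).insert name v).get? n = d.get? n := by
      intro v
      rw [PySem.Dict.get?_insert, if_neg hn, PySem.Dict.get?_setdefault_of_ne _ _ hn]
    by_cases h0 : i = 0
    · simp [h0, hn, hget]
    · by_cases h1 : i = 1
      · simp [h0, h1, hn, hget]
      · by_cases h2 : i = 2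
        · simp [h0, h1, h2, hn, hget]
        · simp [h0, h1, h2, hn, PySem.Dict.get?_setdefault_of_ne _ _ hn]

lemma pv_step_fst (d : PySem.Dict String (String × Int × Int × Int))
    (hd : ∀ k v, d.get? k = some v → v.1 = k) :
    ∀ p k v, (pvStep d p).get? k = some v → v.1 = k := by
  rintro ⟨i, name⟩ k v h
  rw [pv_step_get?] at h
  by_cases hk : k = name
  · rw [if_pos hk] at h
    cases hv : d.get? name with
    | none => simp [hv] at h; subst h; simp [hk]
    | some w => have hw := hd name w hv; simp [hv] at h; subst h; simp [hw, hk]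
  · rw [if_neg hk] at h; exact hd k v h

lemma pv_cnt_cons (i0 : Int) (n0 : String) (L : List (Int × String)) (i : Int) (n : String) :
    pvCnt ((i0, n0) :: L) i n = (if i0 = i ∧ n0 = n then 1 else 0) + pvCnt L i n := by
  by_cases h : i0 = i ∧ n0 = n
  · simp [pvCnt, h.1, h.2, Nat.add_comm]
  · rcases not_and_or.mp h with h' | h' <;>
      simp [pvCnt, List.filter_cons, h', h]

lemma pv_cnt_zero_of_not_mem (L : List (Int × String)) (i : Int) (n : String)
    (h : n ∉ L.map (·.2)) : pvCnt L i n = 0 := by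
  unfold pvCnt
  rw [List.length_eq_zero_iff, List.filter_eq_nil_iff]
  rintro ⟨j, m⟩ hm hb
  simp at hb
  exact h (List.mem_map.mpr ⟨(j, m), hm, hb.2⟩)

lemma pv_pairs_get? (L : List (Int × String)) :
    ∀ (d : PySem.Dict String (String × Int × Int × Int)),
      (∀ k v, d.get? k = some v → v.1 = k) → ∀ n,
      (L.foldl pvStep d).get? n =
        if n ∈ L.map (·.2) then
          some (n, ((d.get? n).getD (n, 0, 0, 0)).2.1 + (pvCnt L 0 n : Int),
                   ((d.get? n).getD (n, 0, 0, 0)).2.2.1 + (pvCnt L 1 n : Int),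
                   ((d.get? n).getD (n, 0, 0, 0)).2.2.2 + (pvCnt L 2 n : Int))
        else d.get? n := by
  induction L with
  | nil => intro d hd n; simp [pvCnt]
  | cons p L ih =>
    rintro d hd n
    obtain ⟨i0, n0⟩ := p
    rw [List.foldl_cons, ih (pvStep d (i0, n0)) (fun k v => pv_step_fst d hd (i0, n0) k v)]
    have hbase1 : ((d.get? n).getD (n, 0, 0, 0)).1 = n := by
      cases hv : d.get? n with
      | none => simp
      | some w => simpa using hd n w hv
    by_cases hn : n = n0
    · subst hn
      have hstep := pv_step_get? d i0 n n
      rw [if_pos rfl] at hstep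
      by_cases hmem : n ∈ L.map (·.2)
      · rw [if_pos hmem, if_pos (by simp), hstep]
        simp only [Option.getD_some, pv_cnt_cons, hbase1, and_true, Option.some.injEq,
          Prod.mk.injEq, true_and]
        refine ⟨?_, ?_, ?_⟩ <;> (push_cast; split_ifs <;> omega)
      · rw [if_neg hmem, if_pos (by simp), hstep]
        simp only [Option.getD_some, pv_cnt_cons, hbase1, and_true, Option.some.injEq,
          Prod.mk.injEq, true_and, pv_cnt_zero_of_not_mem L _ _ hmem]
        refine ⟨?_, ?_, ?_⟩ <;> (push_cast; split_ifs <;> omega)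
    · have hstep := pv_step_get? d i0 n0 n
      rw [if_neg hn] at hstep
      have hcnt : ∀ i, pvCnt ((i0, n0) :: L) i n = pvCnt L i n := by
        intro i; rw [pv_cnt_cons]; simp [Ne.symm hn, hn]
      rw [hstep]
      by_cases hmem : n ∈ L.map (·.2)
      · rw [if_pos hmem, if_pos (by simp [hmem]), hcnt, hcnt, hcnt]
      · rw [if_neg hmem, if_neg (by simp [hmem, hn])]

lemma pv_step_keys (d : PySem.Dict String (String × Int × Int × Int)) (p : Int × String) :
    (pvStep d p).keys = PySem.Set.add d.keys p.2 := by
  obtain ⟨i, name⟩ := p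
  have hc : (d.setdefault name (name, 0, 0, 0)).contains name = true := by
    simp [PySem.Dict.contains_setdefault]
  have hk : (d.setdefault name (name, 0, 0, 0)).keys = PySem.Set.add d.keys name := by
    rw [PySem.Dict.keys_setdefault, PySem.Set.add_eq_ite]
    by_cases h : d.contains name = true
    · rw [if_pos h, if_pos (by rwa [← PySem.Dict.contains_iff_mem_keys])]
    · rw [if_neg h, if_neg (by rw [← PySem.Dict.contains_iff_mem_keys]; simpa using h)]
  unfold pvStep
  split_ifs <;> simp [PySem.Dict.keys_insert_of_contains _ _ hc, hk]

lemma pv_pairs_keys (L : List (Int × String)) :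
    ∀ d : PySem.Dict String (String × Int × Int × Int),
      (L.foldl pvStep d).keys = PySem.Set.update d.keys (L.map (·.2)) := by
  induction L with
  | nil => intro d; simp [PySem.Set.update]
  | cons p L ih =>
    intro d
    rw [List.foldl_cons, ih, List.map_cons, PySem.Set.update_cons, pv_step_keys]

lemma pv_cnt_enumerate (xs : List String) (i : Int) (n : String) :
    ∀ s : Int, pvCnt (PySem.List.enumerate xs s) i n
      = if s ≤ i ∧ xs[(i - s).toNat]? = some n then 1 else 0 := by
  induction xs with
  | nil => intro s; simp [pvCnt, PySem.List.enumerate_nil]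
  | cons x xs ih =>
    intro s
    rw [PySem.List.enumerate_cons, pv_cnt_cons, ih (s + 1)]
    by_cases hsi : i = s
    · subst hsi
      have h0 : (i - i).toNat = 0 := by omega
      by_cases hx : x = n
      · simp [hx, h0, show ¬ (i + 1 ≤ i) by omega]
      · simp [hx, h0, show ¬ (i + 1 ≤ i) by omega, Ne.symm hx]
    · have hhead : ¬ (s = i ∧ x = n) := fun h => hsi (h.1.symm)
      rw [if_neg hhead, Nat.zero_add]
      by_cases hlt : s + 1 ≤ i
      · have ht : (i - s).toNat = (i - (s + 1)).toNat + 1 := by omega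
        simp [ht, show s ≤ i by omega, hlt]
      · have : ¬ s ≤ i := by omega
        simp [hlt, this]

def pvLoopA (winners : List (List String)) (d : PySem.Dict String (String × Int × Int × Int)) :
    PySem.Dict String (String × Int × Int × Int) :=
  winners.foldl (fun d e => (PySem.List.enumerate e).foldl pvStep d) d

lemma pv_col_count_cons (e : List String) (rest : List (List String)) (k : Nat) (n : String) :
    (pvCol (e :: rest) k).count n
      = (if e[k]? = some n then 1 else 0) + (pvCol rest k).count n := by
  unfold pvCol
  rw [List.filterMap_cons]
  cases h : e[k]? with
  | none => simp [h]
  | some x =>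
    by_cases hx : x = n
    · simp [h, hx, List.count_cons]; omega
    · simp [h, hx, List.count_cons, Ne.symm hx]

lemma pv_loopA_get? (winners : List (List String)) :
    ∀ d : PySem.Dict String (String × Int × Int × Int),
      (∀ k v, d.get? k = some v → v.1 = k) → ∀ n,
      (pvLoopA winners d).get? n =
        if n ∈ winners.flatMap id then
          some (n, ((d.get? n).getD (n, 0, 0, 0)).2.1 + ((pvCol winners 0).count n : Int),
                   ((d.get? n).getD (n, 0, 0, 0)).2.2.1 + ((pvCol winners 1).count n : Int),
                   ((d.get? n).getD (n, 0, 0, 0)).2.2.2 + ((pvCol winners 2).count n : Int))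
        else d.get? n := by
  induction winners with
  | nil => intro d hd n; simp [pvLoopA, pvCol]
  | cons e rest ih =>
    intro d hd n
    have hd' : ∀ k v, ((PySem.List.enumerate e).foldl pvStep d).get? k = some v → v.1 = k := by
      intro k v h
      rw [pv_pairs_get? _ d hd] at h
      by_cases hm : k ∈ (PySem.List.enumerate e).map (·.2)
      · rw [if_pos hm] at h
        cases h; rfl
      · rw [if_neg hm] at h; exact hd k v h
    have hcnt : ∀ m : Nat, pvCnt (PySem.List.enumerate e) (m : Int) n
        = if e[m]? = some n then 1 else 0 := by
      intro m
      rw [show PySem.List.enumerate e = PySem.List.enumerate e 0 from rfl, pv_cnt_enumerate]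
      have : ((m : Int) - 0).toNat = m := by omega
      simp [this]
    have hin := pv_pairs_get? (PySem.List.enumerate e) d hd n
    rw [PySem.List.map_snd_enumerate] at hin
    show (pvLoopA rest ((PySem.List.enumerate e).foldl pvStep d)).get? n = _
    rw [ih _ hd' n, hin]
    by_cases hmem : n ∈ e
    · have h1 : n ∈ (e :: rest).flatMap id := by simp [hmem]
      rw [if_pos hmem]
      by_cases hrest : n ∈ rest.flatMap id
      · rw [if_pos hrest, if_pos h1]
        simp only [Option.getD_some, Option.some.injEq, Prod.mk.injEq, true_and]
        rw [pv_col_count_cons, pv_col_count_cons, pv_col_count_cons]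
        have e0 := hcnt 0; have e1 := hcnt 1; have e2 := hcnt 2
        push_cast at e0 e1 e2 ⊢
        refine ⟨?_, ?_, ?_⟩ <;> (split_ifs at * <;> omega)
      · rw [if_neg hrest, if_pos h1]
        simp only [Option.getD_some, Option.some.injEq, Prod.mk.injEq, true_and]
        rw [pv_col_count_cons, pv_col_count_cons, pv_col_count_cons]
        have hc0 : (pvCol rest 0).count n = 0 := by
          simp [pvCol, List.count_eq_zero]
          intro l hl h; exact hrest (by simp [List.mem_flatMap]; exact ⟨l, hl, List.mem_of_getElem? h⟩)
        have hc1 : (pvCol rest 1).count n = 0 := by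
          simp [pvCol, List.count_eq_zero]
          intro l hl h; exact hrest (by simp [List.mem_flatMap]; exact ⟨l, hl, List.mem_of_getElem? h⟩)
        have hc2 : (pvCol rest 2).count n = 0 := by
          simp [pvCol, List.count_eq_zero]
          intro l hl h; exact hrest (by simp [List.mem_flatMap]; exact ⟨l, hl, List.mem_of_getElem? h⟩)
        have e0 := hcnt 0; have e1 := hcnt 1; have e2 := hcnt 2
        rw [hc0, hc1, hc2]
        push_cast at e0 e1 e2 ⊢
        refine ⟨?_, ?_, ?_⟩ <;> (split_ifs at * <;> omega)
    · have hcz : ∀ m : Nat, pvCnt (PySem.List.enumerate e) (m : Int) n = 0 := by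
        intro m
        rw [hcnt]
        split_ifs with h
        · exact absurd (List.mem_of_getElem? h) hmem
        · rfl
      rw [if_neg hmem]
      by_cases hrest : n ∈ rest.flatMap id
      · have h1 : n ∈ (e :: rest).flatMap id := by
          rw [List.flatMap_cons]; exact List.mem_append_right _ hrest
        rw [if_pos hrest, if_pos h1]
        simp only [Option.some.injEq, Prod.mk.injEq, true_and]
        rw [pv_col_count_cons, pv_col_count_cons, pv_col_count_cons]
        have hz : ∀ m : Nat, ¬ (e[m]? = some n) := by
          intro m h; exact hmem (List.mem_of_getElem? h)
        rw [if_neg (hz 0), if_neg (hz 1), if_neg (hz 2)]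
        simp
      · rw [if_neg hrest, if_neg (by
          rw [List.flatMap_cons]; intro h
          rcases List.mem_append.mp h with h | h
          · exact hmem h
          · exact hrest h)]

lemma pv_loopA_keys (winners : List (List String)) :
    ∀ d : PySem.Dict String (String × Int × Int × Int),
      (pvLoopA winners d).keys = PySem.Set.update d.keys (winners.flatMap id) := by
  induction winners with
  | nil => intro d; simp [pvLoopA, PySem.Set.update]
  | cons e rest ih =>
    intro d
    show (pvLoopA rest ((PySem.List.enumerate e).foldl pvStep d)).keys = _
    rw [ih, pv_pairs_keys, PySem.List.map_snd_enumerate, List.flatMap_cons,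
      PySem.Set.update_append]
    rfl

lemma pv_sorted2_eq_sorted_lex {α κ1 κ2 : Type} [LinearOrder κ1] [LinearOrder κ2]
    (xs : List α) (k1 : α → κ1) (k2 : α → κ2) :
    PySem.List.sorted2 xs k1 k2 = PySem.List.sorted xs (fun x => toLex (k1 x, k2 x)) := by
  have hb : (fun a b => decide (k1 a < k1 b) || (!decide (k1 b < k1 a) && decide (k2 a < k2 b)))
      = (fun a b : α => decide ((toLex (k1 a, k2 a) : Lex (κ1 × κ2)) < toLex (k1 b, k2 b))) := by
    funext a b
    rw [Bool.eq_iff_iff]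
    simp only [Bool.or_eq_true, Bool.and_eq_true, Bool.not_eq_true', decide_eq_true_eq,
      decide_eq_false_iff_not, Prod.Lex.lt_iff, ofLex_toLex]
    constructor
    · rintro (h | ⟨hnb, hc⟩)
      · exact Or.inl h
      · by_cases ha : k1 a < k1 b
        · exact Or.inl ha
        · exact Or.inr ⟨le_antisymm (not_lt.mp hnb) (not_lt.mp ha), hc⟩
    · rintro (h | ⟨he, hc⟩)
      · exact Or.inl h
      · exact Or.inr ⟨by simp [he], hc⟩
  have key : ∀ b1 b2 : α → α → Bool, b1 = b2 →
      xs.foldl (fun acc x => PySem.List.insertBy b1 x acc) [] =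
      xs.foldl (fun acc x => PySem.List.insertBy b2 x acc) [] := by
    rintro b1 b2 rfl; rfl
  exact key _ _ hb

lemma pv_sortA_eq (names : List String) (hnd : names.Nodup) (c0 c1 c2 : String → Int) :
    PySem.List.sorted2 (names.map (fun n => (n, c0 n, c1 n, c2 n)))
        (fun c => -c.2.1) (fun c => c.1)
      = (PySem.List.sorted2 names (fun n => -(c0 n)) (fun n => n)).map
          (fun n => (n, c0 n, c1 n, c2 n)) := by
  rw [pv_sorted2_eq_sorted_lex, pv_sorted2_eq_sorted_lex]
  apply PySem.List.sorted_eq_of_perm_of_pairwise_lt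
  · exact (PySem.List.sorted_perm names _ false).map _
  · apply List.pairwise_map.mpr
    have hperm := PySem.List.sorted_perm names (fun n => toLex (-(c0 n), n)) false
    have hnd' : (PySem.List.sorted names (fun n => toLex (-(c0 n), n)) false).Nodup :=
      hperm.nodup_iff.mpr hnd
    have hle := PySem.List.sorted_pairwise names (fun n => toLex (-(c0 n), n))
    exact (hle.and hnd').imp (fun {a b} h =>
      lt_of_le_of_ne h.1 (fun he => h.2 (congrArg (fun p => (ofLex p).2) he)))

-- ===== B-side lemmas =====

-- count of (n, i) in a (String × Int) pair list
def pvCntB (L : List (String × Int)) (n : String) (i : Int) : Nat :=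
  (L.filter (fun q => q.1 == n && q.2 == i)).length

lemma pv_cntB_append (L1 L2 : List (String × Int)) (n : String) (i : Int) :
    pvCntB (L1 ++ L2) n i = pvCntB L1 n i + pvCntB L2 n i := by
  simp [pvCntB, List.filter_append]

lemma pv_cnt_append (L1 L2 : List (Int × String)) (i : Int) (n : String) :
    pvCnt (L1 ++ L2) i n = pvCnt L1 i n + pvCnt L2 i n := by
  simp [pvCnt, List.filter_append]

lemma pv_cntB_swap (L : List (Int × String)) (n : String) (i : Int) :
    pvCntB (L.map (fun q => (q.2, q.1))) n i = pvCnt L i n := by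
  simp only [pvCntB, pvCnt, List.filter_map, List.length_map]
  congr 1
  apply List.filter_congr
  rintro ⟨a, b⟩ _
  simp [Bool.and_comm]

lemma pv_cntB_perm {L1 L2 : List (String × Int)} (h : L1.Perm L2) (n : String) (i : Int) :
    pvCntB L1 n i = pvCntB L2 n i :=
  (h.filter _).length_eq

lemma pv_cntB_zero_of_not_mem (L : List (String × Int)) (n : String) (i : Int)
    (h : n ∉ L.map (·.1)) : pvCntB L n i = 0 := by
  unfold pvCntB
  rw [List.length_eq_zero_iff, List.filter_eq_nil_iff]
  rintro ⟨m, j⟩ hm hb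
  simp at hb
  exact h (List.mem_map.mpr ⟨(m, j), hm, hb.1⟩)

-- pvRunCounts counts the positions 0/1/2 in the run
lemma pv_runCounts_eq (l : List (String × Int)) :
    pvRunCounts l = ((l.countP (fun q => q.2 == 0) : Int),
                     (l.countP (fun q => q.2 == 1) : Int),
                     (l.countP (fun q => q.2 == 2) : Int)) := by
  unfold pvRunCounts
  suffices h : ∀ g s b : Int,
      l.foldl (fun gsb q =>
        if q.2 == 0 then (gsb.1 + 1, gsb.2.1, gsb.2.2)
        else if q.2 == 1 then (gsb.1, gsb.2.1 + 1, gsb.2.2)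
        else if q.2 == 2 then (gsb.1, gsb.2.1, gsb.2.2 + 1)
        else gsb) (g, s, b)
      = (g + (l.countP (fun q => q.2 == 0) : Int),
         s + (l.countP (fun q => q.2 == 1) : Int),
         b + (l.countP (fun q => q.2 == 2) : Int)) by
    simpa using h 0 0 0
  induction l with
  | nil => intro g s b; simp
  | cons q t ih =>
    intro g s b
    rw [List.foldl_cons]
    by_cases h0 : q.2 = 0
    · rw [if_pos (by simp [h0]), ih]
      simp only [List.countP_cons, h0, Prod.mk.injEq]
      refine ⟨?_, ?_, ?_⟩ <;> (simp; try push_cast; try omega)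
    · by_cases h1 : q.2 = 1
      · rw [if_neg (by simp [h0]), if_pos (by simp [h1]), ih]
        simp only [List.countP_cons, h1, Prod.mk.injEq]
        refine ⟨?_, ?_, ?_⟩ <;> (simp [h0]; try push_cast; try omega)
      · by_cases h2 : q.2 = 2
        · rw [if_neg (by simp [h0]), if_neg (by simp [h1]), if_pos (by simp [h2]), ih]
          simp only [List.countP_cons, h2, Prod.mk.injEq]
          refine ⟨?_, ?_, ?_⟩ <;> (simp [h0, h1]; try push_cast; try omega)
        · rw [if_neg (by simp [h0]), if_neg (by simp [h1]), if_neg (by simp [h2]), ih]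
          simp [List.countP_cons, h0, h1, h2]

-- over a run whose names are all n, countP on position = pvCntB
lemma pv_countP_run (l : List (String × Int)) (n : String)
    (hall : ∀ q ∈ l, q.1 = n) (i : Int) :
    l.countP (fun q => q.2 == i) = pvCntB l n i := by
  unfold pvCntB
  rw [List.countP_eq_length_filter]
  congr 1
  apply List.filter_congr
  intro q hq
  simp [hall q hq]

-- Set.update through a fresh head
lemma pv_update_cons_fresh (s : List String) (x : String) (l : List String) (hx : x ∉ l) :
    PySem.Set.update (x :: s) l = x :: PySem.Set.update s l := by
  induction l generalizing s with
  | nil => simp [PySem.Set.update]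
  | cons y t ih =>
    have hxy : ¬ (y == x) = true := by
      simp only [beq_iff_eq]
      intro h; exact hx (h ▸ List.mem_cons_self)
    have hadd : PySem.Set.add (x :: s) y = x :: PySem.Set.add s y := by
      simp only [PySem.Set.add, PySem.Set.contains, List.contains_cons, hxy]
      split <;> simp_all
    rw [PySem.Set.update_cons, PySem.Set.update_cons, hadd,
      ih _ (fun h => hx (List.mem_cons_of_mem _ h))]

lemma pv_update_const (t : List String) (n : String) (h : ∀ m ∈ t, m = n) :
    PySem.Set.update [n] t = [n] := by
  induction t with
  | nil => rfl
  | cons y u ih =>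
    have hy := h y List.mem_cons_self
    subst hy
    rw [PySem.Set.update_cons]
    have hadd : PySem.Set.add [y] y = [y] := by
      simp [PySem.Set.add, PySem.Set.contains]
    rw [hadd]
    exact ih (fun m hm => h m (List.mem_cons_of_mem _ hm))

-- dedup of (all-n run names ++ names without n)
lemma pv_dedup_run (l1 l2 : List String) (n : String)
    (h1 : ∀ m ∈ l1, m = n) (hne : l1 ≠ []) (h2 : n ∉ l2) :
    PySem.List.dedup (l1 ++ l2) = n :: PySem.List.dedup l2 := by
  have hl1 : PySem.Set.ofList l1 = [n] := by
    cases l1 with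
    | nil => exact absurd rfl hne
    | cons x t =>
      have hx := h1 x List.mem_cons_self
      subst hx
      rw [PySem.Set.ofList_eq_foldl, List.foldl_cons]
      have hadd : PySem.Set.add [] x = [x] := rfl
      rw [hadd]
      exact pv_update_const t x (fun m hm => h1 m (List.mem_cons_of_mem _ hm))
  rw [PySem.List.dedup_eq_ofList, PySem.List.dedup_eq_ofList,
    PySem.Set.ofList_eq_foldl, List.foldl_append, ← PySem.Set.ofList_eq_foldl, hl1]
  have : List.foldl PySem.Set.add [n] l2 = PySem.Set.update [n] l2 := rfl
  rw [this, pv_update_cons_fresh [] n l2 h2]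
  rfl

-- names after the run of n are ≠ n in a name-sorted list
lemma pv_dropWhile_ne (l : List (String × Int)) (n : String)
    (hs : l.Pairwise (fun a b => a.1 ≤ b.1)) (hge : ∀ q ∈ l, n ≤ q.1) :
    ∀ q ∈ l.dropWhile (fun q => q.1 == n), q.1 ≠ n := by
  induction l with
  | nil => simp
  | cons x t ih =>
    by_cases hx : x.1 = n
    · rw [List.dropWhile_cons_of_pos (by simp [hx])]
      exact ih (List.Pairwise.of_cons hs) (fun q hq => hge q (List.mem_cons_of_mem _ hq))
    · rw [List.dropWhile_cons_of_neg (by simp [hx])]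
      intro q hq
      rcases List.mem_cons.mp hq with rfl | hq'
      · exact hx
      · have hxq : x.1 ≤ q.1 := (List.pairwise_cons.mp hs).1 q hq'
        have hnx : n < x.1 := lt_of_le_of_ne (hge x List.mem_cons_self) (Ne.symm hx)
        exact fun h => absurd (h ▸ hxq) (not_le.mpr hnx)

-- grouping a name-sorted pair list
lemma pv_rowsOf_sorted (ps : List (String × Int))
    (hs : ps.Pairwise (fun a b => a.1 ≤ b.1)) :
    pvRowsOf ps = (PySem.List.dedup (ps.map (·.1))).map
      (fun n => (n, (pvCntB ps n 0 : Int), (pvCntB ps n 1 : Int), (pvCntB ps n 2 : Int))) := by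
  induction ps using pvRowsOf.induct with
  | case1 => simp [pvRowsOf]
  | case2 p rest tl ih =>
    have hs' := List.pairwise_cons.mp hs
    have hsplit : (p :: rest).takeWhile (fun q => q.1 == p.1)
        ++ (p :: rest).dropWhile (fun q => q.1 == p.1) = p :: rest :=
      List.takeWhile_append_dropWhile
    have hrun_names : ∀ q ∈ (p :: rest).takeWhile (fun q => q.1 == p.1), q.1 = p.1 :=
      fun q hq => by simpa using List.mem_takeWhile_imp hq
    have hrun_ne : (p :: rest).takeWhile (fun q => q.1 == p.1) ≠ [] := by
      rw [List.takeWhile_cons_of_pos (by simp)]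
      simp
    have htail_pw : ((p :: rest).dropWhile (fun q => q.1 == p.1)).Pairwise
        (fun a b => a.1 ≤ b.1) := hs.sublist (List.dropWhile_sublist _)
    have hge : ∀ q ∈ p :: rest, p.1 ≤ q.1 := by
      intro q hq
      rcases List.mem_cons.mp hq with rfl | hq'
      · exact le_refl _
      · exact hs'.1 q hq'
    have htail_ne : ∀ q ∈ (p :: rest).dropWhile (fun q => q.1 == p.1), q.1 ≠ p.1 :=
      pv_dropWhile_ne _ p.1 hs hge
    have htail_names : p.1 ∉ ((p :: rest).dropWhile (fun q => q.1 == p.1)).map (·.1) := by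
      intro h
      obtain ⟨q, hq, hq1⟩ := List.mem_map.mp h
      exact htail_ne q hq hq1
    have hcnt_run0 : ∀ n' i, n' ≠ p.1 →
        pvCntB ((p :: rest).takeWhile (fun q => q.1 == p.1)) n' i = 0 := by
      intro n' i hn'
      apply pv_cntB_zero_of_not_mem
      intro h
      obtain ⟨q, hq, hq1⟩ := List.mem_map.mp h
      exact hn' (hq1 ▸ hrun_names q hq)
    have hcnt_split : ∀ n' i, pvCntB (p :: rest) n' i
        = pvCntB ((p :: rest).takeWhile (fun q => q.1 == p.1)) n' i
          + pvCntB ((p :: rest).dropWhile (fun q => q.1 == p.1)) n' i := by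
      intro n' i
      conv_lhs => rw [← hsplit]
      rw [pv_cntB_append]
    have hdedup : PySem.List.dedup ((p :: rest).map (·.1))
        = p.1 :: PySem.List.dedup (((p :: rest).dropWhile (fun q => q.1 == p.1)).map (·.1)) := by
      conv_lhs => rw [← hsplit]
      rw [List.map_append]
      apply pv_dedup_run
      · intro m hm
        obtain ⟨q, hq, hq1⟩ := List.mem_map.mp hm
        exact hq1 ▸ hrun_names q hq
      · intro h
        exact hrun_ne (List.map_eq_nil_iff.mp h)
      · exact htail_names
    rw [pvRowsOf, hdedup, List.map_cons]
    congr 1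
    · -- head row
      rw [pv_runCounts_eq]
      have hc : ∀ i : Int, pvCntB (p :: rest) p.1 i
          = pvCntB ((p :: rest).takeWhile (fun q => q.1 == p.1)) p.1 i := by
        intro i
        rw [hcnt_split, pv_cntB_zero_of_not_mem _ _ _ htail_names, Nat.add_zero]
      simp only [Prod.mk.injEq, true_and]
      exact ⟨congrArg Nat.cast ((pv_countP_run _ _ hrun_names 0).trans (hc 0).symm),
             congrArg Nat.cast ((pv_countP_run _ _ hrun_names 1).trans (hc 1).symm),
             congrArg Nat.cast ((pv_countP_run _ _ hrun_names 2).trans (hc 2).symm)⟩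
    · -- tail rows
      rw [ih htail_pw]
      apply List.map_congr_left
      intro n' hn'
      have hmem : n' ∈ ((p :: rest).dropWhile (fun q => q.1 == p.1)).map (·.1) :=
        (PySem.List.mem_dedup _ n').mp hn'
      have hne : n' ≠ p.1 := by
        obtain ⟨q, hq, hq1⟩ := List.mem_map.mp hmem
        exact hq1 ▸ htail_ne q hq
      have hc : ∀ i : Int, pvCntB (p :: rest) n' i
          = pvCntB ((p :: rest).dropWhile (fun q => q.1 == p.1)) n' i := by
        intro i
        rw [hcnt_split, hcnt_run0 n' i hne, Nat.zero_add]
      simp only [Prod.mk.injEq, true_and]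
      exact ⟨by rw [hc], by rw [hc], by rw [hc]⟩

-- counts over the flattened enumerate pairs are the column counts
lemma pv_cnt_flat (winners : List (List String)) (m : Nat) (n : String) :
    pvCnt (winners.flatMap (fun e => PySem.List.enumerate e)) (m : Int) n
      = (pvCol winners m).count n := by
  induction winners with
  | nil => simp [pvCnt, pvCol]
  | cons e rest ih =>
    rw [List.flatMap_cons, pv_cnt_append, ih, pv_col_count_cons]
    congr 1
    rw [show PySem.List.enumerate e = PySem.List.enumerate e 0 from rfl, pv_cnt_enumerate]
    have : ((m : Int) - 0).toNat = m := by omega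
    simp [this]

lemma pv_main (winners : List (List String)) :
    count_medals winners = count_medals_alt winners := by
  -- A side: characterize the dict values
  simp only [count_medals, count_medals_alt, pv_inner_eq]
  have hkeys : (pvLoopA winners PySem.Dict.empty).keys
      = PySem.Set.ofList (winners.flatMap id) := by
    rw [pv_loopA_keys]
    exact PySem.Set.update_empty _
  have hget : ∀ n, n ∈ winners.flatMap id →
      (pvLoopA winners PySem.Dict.empty).get? n = some (pvF winners n) := by
    intro n hn
    rw [pv_loopA_get? winners PySem.Dict.empty
      (by intro k v h; rw [PySem.Dict.get?_empty] at h; cases h) n, if_pos hn]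
    simp [PySem.Dict.get?_empty, pvF]
  have hvals : (pvLoopA winners PySem.Dict.empty).values
      = (PySem.Set.ofList (winners.flatMap id)).map (pvF winners) := by
    rw [PySem.Dict.values_eq_map_keys _
      (by rw [hkeys]; exact PySem.Set.nodup_ofList _) ("", 0, 0, 0), hkeys]
    apply List.map_congr_left
    intro k hk
    exact PySem.Dict.getD_of_get?_eq_some _ _ (hget k ((PySem.Set.mem_ofList _ _).mp hk))
  have hfold : List.foldl (fun d event => List.foldl pvStep d (PySem.List.enumerate event))
      PySem.Dict.empty winners = pvLoopA winners PySem.Dict.empty := rfl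
  rw [hfold, hvals]
  -- B side: characterize the sorted-grouped rows
  set flatP := winners.flatMap (fun e => (PySem.List.enumerate e).map (fun q => (q.2, q.1)))
    with hflatP
  set pairs := PySem.List.sorted2 flatP (fun p => p.1) (fun p => p.2) with hpairs
  have hperm : pairs.Perm flatP := PySem.List.sorted2_perm flatP _ _ false
  have hpw : pairs.Pairwise (fun a b => a.1 ≤ b.1) := by
    rw [hpairs, pv_sorted2_eq_sorted_lex]
    have := PySem.List.sorted_pairwise flatP (fun p => toLex (p.1, p.2))
    exact this.imp (fun {a b} h => by
      rcases Prod.Lex.le_iff.mp h with h' | h'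
      · exact le_of_lt h'
      · exact le_of_eq h'.1)
  have hflat_swap : flatP = (winners.flatMap (fun e => PySem.List.enumerate e)).map
      (fun q => (q.2, q.1)) := by
    rw [hflatP, List.map_flatMap]
  have hcnt : ∀ n (m : Nat), pvCntB pairs n (m : Int) = (pvCol winners m).count n := by
    intro n m
    rw [pv_cntB_perm hperm, hflat_swap, pv_cntB_swap, pv_cnt_flat]
  have hflatnames : flatP.map (·.1) = winners.flatMap id := by
    rw [hflatP, List.map_flatMap]
    have h1 : ∀ e : List String,
        ((PySem.List.enumerate e).map (fun q => (q.2, q.1))).map (·.1) = e := by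
      intro e
      rw [List.map_map]
      exact PySem.List.map_snd_enumerate e 0
    simp only [h1]
    rfl
  have hnamesmem : ∀ x, x ∈ pairs.map (·.1) ↔ x ∈ winners.flatMap id := by
    intro x
    have h2 := List.Perm.mem_iff (a := x) (hperm.map (·.1))
    rw [hflatnames] at h2
    exact h2
  set namesB := PySem.List.dedup (pairs.map (·.1)) with hnamesB
  have hrowsOf : pvRowsOf pairs = namesB.map (pvF winners) := by
    rw [pv_rowsOf_sorted pairs hpw]
    apply List.map_congr_left
    intro n _
    simp only [pvF, Prod.mk.injEq, true_and]
    exact ⟨by rw [show (0 : Int) = ((0 : Nat) : Int) by norm_num, hcnt],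
           by rw [show (1 : Int) = ((1 : Nat) : Int) by norm_num, hcnt],
           by rw [show (2 : Int) = ((2 : Nat) : Int) by norm_num, hcnt]⟩
  have hnodupB : namesB.Nodup := PySem.List.nodup_dedup _
  have hnodupA : (PySem.Set.ofList (winners.flatMap id)).Nodup := PySem.Set.nodup_ofList _
  have hpermNames : namesB.Perm (PySem.Set.ofList (winners.flatMap id)) := by
    rw [List.perm_ext_iff_of_nodup hnodupB hnodupA]
    intro a
    rw [hnamesB, PySem.List.mem_dedup, PySem.Set.mem_ofList]
    exact hnamesmem a
  rw [hrowsOf]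
  -- both sides are sorted2 of name.map (pvF winners) over permuted nodup name lists
  have hF : ∀ (names : List String), names.Nodup →
      PySem.List.sorted2 (names.map (pvF winners)) (fun c => -c.2.1) (fun c => c.1)
        = (PySem.List.sorted2 names (fun n => -(((pvCol winners 0).count n : Int))) (fun n => n)).map
            (pvF winners) := by
    intro names hnd
    exact pv_sortA_eq names hnd _ _ _
  rw [hF _ hnodupA, hF _ hnodupB]
  have hinj : Function.Injective
      (fun n : String => (toLex (-(((pvCol winners 0).count n : Int)), n) : Lex (Int × String))) := by
    intro a b h
    have := congrArg (fun p : Lex (Int × String) => (ofLex p).2) h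
    simpa using this
  have hsort : PySem.List.sorted2 namesB
        (fun n => -(((pvCol winners 0).count n : Int))) (fun n => n)
      = PySem.List.sorted2 (PySem.Set.ofList (winners.flatMap id))
        (fun n => -(((pvCol winners 0).count n : Int))) (fun n => n) := by
    rw [pv_sorted2_eq_sorted_lex, pv_sorted2_eq_sorted_lex]
    exact PySem.List.sorted_eq_sorted_of_perm _ _ _ hinj hpermNames
  rw [hsort]

-- ===== VERDICT (by name: the statement is the Claim_ definition above) =====
theorem count_medals_spec : Claim_equal_count_medals := by
  intro winners _
  exact pv_main winners
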